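-- pv_equiv track=rewrite | github.com/8abak/ctrade-openapi-client | datavis/regression.py | trailing_residual_run
-- ===== SOURCE A (Python) =====
-- from typing import Any, Dict, List, Optional, Sequence, Tuple
--
-- def trailing_residual_run(signs: Sequence[int]) -> int:
--     run_length = 0
--     active_sign = 0
--     for value in reversed(signs):
--         if value == 0:
--             continue
--         if active_sign == 0:
--             active_sign = value
--         if value != active_sign:
--             break
--         run_length += 1
--     return run_length
-- ===== SOURCE B (Python) =====
-- def trailing_residual_run(signs):
--     current = 0
--     count = 0
--     for value in signs:
--         if value == 0:
--             continue
--         if value == current: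
--             count += 1
--         else:
--             current = value
--             count = 1
--     return count
-- ===== Notes on version B (the rewrite author's own statement) =====
-- stated objective: alternative
-- what changed: Replaced the backward scan with early break by a single forward pass keeping a reset-on-change run accumulator (last nonzero value seen + its run length), zeros skipped, no break.
import Mathlib
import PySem

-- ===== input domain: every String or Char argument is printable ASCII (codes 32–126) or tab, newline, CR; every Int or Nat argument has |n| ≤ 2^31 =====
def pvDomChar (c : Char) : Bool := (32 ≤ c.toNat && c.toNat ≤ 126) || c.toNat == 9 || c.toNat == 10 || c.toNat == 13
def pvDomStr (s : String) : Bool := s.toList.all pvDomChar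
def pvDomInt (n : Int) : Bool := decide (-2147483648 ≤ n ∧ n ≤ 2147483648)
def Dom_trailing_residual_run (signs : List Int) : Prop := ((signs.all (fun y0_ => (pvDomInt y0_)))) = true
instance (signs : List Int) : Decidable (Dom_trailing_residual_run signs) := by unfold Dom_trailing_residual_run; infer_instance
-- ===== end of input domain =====

-- B replaces A's backward scan with early break by a forward pass with a reset-on-change run accumulator; same result, no speed claim.
-- ===== PORT A =====
def pvLoopA : List Int → Int → Int → Int
  | [], run_length, _ => run_length
  | value :: rest, run_length, active_sign =>
    if value == 0 then pvLoopA rest run_length active_sign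
    else
      let act := if active_sign == 0 then value else active_sign
      if value != act then run_length
      else pvLoopA rest (run_length + 1) act

def trailing_residual_run (signs : List Int) : Int := pvLoopA signs.reverse 0 0

-- ===== PORT B =====
def pvLoopB : List Int → Int → Int → Int
  | [], _, count => count
  | value :: rest, current, count =>
    if value == 0 then pvLoopB rest current count
    else if value == current then pvLoopB rest current (count + 1)
    else pvLoopB rest value 1

def trailing_residual_run_alt (signs : List Int) : Int := pvLoopB signs 0 0

-- ===== PRECONDITION & SPEC =====
def Spec_trailing_residual_run (signs : List Int) (out : Int) : Prop := out = trailing_residual_run_alt signs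
instance (signs : List Int) (out : Int) : Decidable (Spec_trailing_residual_run signs out) := by unfold Spec_trailing_residual_run; infer_instance

-- ===== CLAIM (what is proved, stated in full; the proofs are below) =====
def Claim_equal_trailing_residual_run : Prop := ∀ (signs : List Int), Dom_trailing_residual_run signs → Spec_trailing_residual_run signs (trailing_residual_run signs)

-- ===== LEMMAS AND PROOFS =====

-- head run length of a list (1 + length of the takeWhile-equal prefix of the tail)
def pvHead : List Int → Int
  | [] => 0
  | x :: r => 1 + ((r.takeWhile (fun y => y == x)).length : Int)

-- trailing run length of a list, recursively
def pvTail : List Int → Int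
  | [] => 0
  | v :: rest => if rest.all (fun y => y == v) then (rest.length : Int) + 1 else pvTail rest

lemma loopA_filter (m : List Int) (run act : Int) :
    pvLoopA m run act = pvLoopA (m.filter (fun x => !(x == 0))) run act := by
  induction m generalizing run act with
  | nil => rfl
  | cons v rest ih =>
    by_cases h : v = 0
    · subst h
      rw [pvLoopA, if_pos (by simp), List.filter_cons_of_neg (by simp)]
      exact ih _ _
    · rw [List.filter_cons_of_pos (by simp [h])]
      simp only [pvLoopA, show (v == 0) = false by simp [h], Bool.false_eq_true, if_false]
      split
      all_goals split
      all_goals first | rfl | exact ih _ _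

lemma loopB_filter (m : List Int) (cur cnt : Int) :
    pvLoopB m cur cnt = pvLoopB (m.filter (fun x => !(x == 0))) cur cnt := by
  induction m generalizing cur cnt with
  | nil => rfl
  | cons v rest ih =>
    by_cases h : v = 0
    · subst h
      rw [pvLoopB, if_pos (by simp), List.filter_cons_of_neg (by simp)]
      exact ih _ _
    · rw [List.filter_cons_of_pos (by simp [h])]
      simp only [pvLoopB, show (v == 0) = false by simp [h], Bool.false_eq_true, if_false]
      split
      · exact ih _ _
      · exact ih _ _

lemma loopA_run (m : List Int) (act : Int) (hact : act ≠ 0)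
    (hm : ∀ x ∈ m, x ≠ 0) :
    ∀ run : Int, pvLoopA m run act = run + ((m.takeWhile (fun y => y == act)).length : Int) := by
  induction m with
  | nil => intro run; simp [pvLoopA, List.takeWhile]
  | cons v rest ih =>
    intro run
    have hv : v ≠ 0 := hm v List.mem_cons_self
    have hrest : ∀ x ∈ rest, x ≠ 0 := fun x hx => hm x (List.mem_cons_of_mem _ hx)
    rw [pvLoopA]
    simp only [show (v == 0) = false by simp [hv], Bool.false_eq_true, if_false,
      show (act == 0) = false by simpa using hact]
    by_cases he : v = act
    · subst he
      rw [if_neg (by simp), List.takeWhile_cons_of_pos (by simp), ih hrest (run + 1)]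
      simp only [List.length_cons]
      push_cast
      ring
    · rw [if_pos (by simpa using he), List.takeWhile_cons_of_neg (by simpa using he)]
      simp

lemma loopA_head (m : List Int) (hm : ∀ x ∈ m, x ≠ 0) :
    pvLoopA m 0 0 = pvHead m := by
  cases m with
  | nil => rfl
  | cons x r =>
    have hx : x ≠ 0 := hm x List.mem_cons_self
    have hr : ∀ y ∈ r, y ≠ 0 := fun y hy => hm y (List.mem_cons_of_mem _ hy)
    rw [pvLoopA]
    simp only [show (x == 0) = false by simp [hx], Bool.false_eq_true, if_false,
      beq_self_eq_true, if_true]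
    rw [if_neg (by simp), loopA_run r x hx hr (0 + 1), pvHead]
    push_cast
    ring

lemma loopB_run (m : List Int) (hm : ∀ x ∈ m, x ≠ 0) :
    ∀ cur cnt : Int, cur ≠ 0 →
    pvLoopB m cur cnt =
      if m.all (fun y => y == cur) then cnt + (m.length : Int) else pvTail m := by
  induction m with
  | nil => intro cur cnt _; simp [pvLoopB]
  | cons v rest ih =>
    intro cur cnt hcur
    have hv : v ≠ 0 := hm v List.mem_cons_self
    have hrest : ∀ x ∈ rest, x ≠ 0 := fun x hx => hm x (List.mem_cons_of_mem _ hx)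
    by_cases he : v = cur
    · subst he
      rw [pvLoopB, if_neg (by simp [hv]), if_pos (by simp), ih hrest v (cnt + 1) hv]
      by_cases hall : (rest.all fun y => y == v) = true
      · rw [if_pos hall, if_pos (by simp [List.all_cons, hall]), List.length_cons]
        push_cast
        ring
      · rw [if_neg hall, if_neg (by simp [List.all_cons, hall]), pvTail, if_neg hall]
    · rw [pvLoopB, if_neg (by simp [hv]), if_neg (by simp [he]), ih hrest v 1 hv,
        if_neg (show ¬ ((v :: rest).all fun y => y == cur) = true by simp [List.all_cons, he]),
        pvTail]
      by_cases hall : (rest.all fun y => y == v) = true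
      · rw [if_pos hall, if_pos hall]
        ring
      · rw [if_neg hall, if_neg hall]

lemma loopB_tail (m : List Int) (hm : ∀ x ∈ m, x ≠ 0) :
    pvLoopB m 0 0 = pvTail m := by
  cases m with
  | nil => rfl
  | cons v rest =>
    have hv : v ≠ 0 := hm v List.mem_cons_self
    have hrest : ∀ x ∈ rest, x ≠ 0 := fun x hx => hm x (List.mem_cons_of_mem _ hx)
    rw [pvLoopB, if_neg (by simp [hv]), if_neg (by simp [hv]),
      loopB_run rest hrest v 1 hv, pvTail]
    by_cases hall : (rest.all fun y => y == v) = true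
    · rw [if_pos hall, if_pos hall]
      ring
    · rw [if_neg hall, if_neg hall]

-- takeWhile over a snoc, when the appended element or some list element fails the predicate
lemma takeWhile_snoc (r : List Int) (x v : Int)
    (h : (v == x) = false ∨ ∃ y ∈ r, (y == x) = false) :
    (r ++ [v]).takeWhile (fun y => y == x) = r.takeWhile (fun y => y == x) := by
  induction r with
  | nil =>
    rcases h with h | ⟨y, hy, _⟩
    · rw [List.nil_append, List.takeWhile_cons_of_neg (p := fun y => y == x) (by simp [h]),
        List.takeWhile_nil]
    · simp at hy
  | cons a t ih =>
    by_cases ha : (a == x) = true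
    · rw [List.cons_append,
        List.takeWhile_cons_of_pos (p := fun y => y == x) ha,
        List.takeWhile_cons_of_pos (p := fun y => y == x) ha]
      have h' : (v == x) = false ∨ ∃ y ∈ t, (y == x) = false := by
        rcases h with h | ⟨y, hy, hyx⟩
        · exact Or.inl h
        · rcases List.mem_cons.mp hy with rfl | hmem
          · exact absurd ha (by simp [hyx])
          · exact Or.inr ⟨y, hmem, hyx⟩
      rw [ih h']
    · rw [List.cons_append,
        List.takeWhile_cons_of_neg (p := fun y => y == x) ha,
        List.takeWhile_cons_of_neg (p := fun y => y == x) ha]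

lemma takeWhile_snoc_of_all (r : List Int) (x : Int)
    (h : ∀ y ∈ r, (y == x) = true) :
    (r ++ [x]).takeWhile (fun y => y == x) = r ++ [x] := by
  induction r with
  | nil => simp [List.takeWhile]
  | cons a t ih =>
    have ha : (a == x) = true := h a List.mem_cons_self
    rw [List.cons_append,
      List.takeWhile_cons_of_pos (p := fun y => y == x) ha,
      ih (fun y hy => h y (List.mem_cons_of_mem _ hy))]

lemma tail_eq_head_reverse (m : List Int) :
    pvTail m = pvHead m.reverse := by
  induction m with
  | nil => rfl
  | cons v rest ih =>
    rw [pvTail, List.reverse_cons]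
    cases hr : rest.reverse with
    | nil =>
      have hnil : rest = [] := by simpa using congrArg List.reverse hr
      subst hnil
      simp [pvHead, List.takeWhile]
    | cons x r =>
      have hrest : rest = (x :: r).reverse := by rw [← hr, List.reverse_reverse]
      rw [hr] at ih
      by_cases hall : (rest.all fun y => y == v) = true
      · have hx : (x == v) = true := by
          apply List.all_eq_true.mp hall
          rw [hrest]; simp
        have hx' : x = v := by simpa using hx
        subst hx'
        have hrall : ∀ y ∈ r, (y == x) = true := by
          intro y hy
          apply List.all_eq_true.mp hall
          rw [hrest]; simp [hy]
        rw [if_pos hall, List.cons_append, pvHead, takeWhile_snoc_of_all r x hrall]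
        have hlen : rest.length = r.length + 1 := by rw [hrest]; simp
        rw [hlen]
        simp [List.length_append]
        ring
      · rw [if_neg hall, ih, List.cons_append, pvHead, pvHead]
        have hex : (v == x) = false ∨ ∃ y ∈ r, (y == x) = false := by
          by_cases hxv : v = x
          · right
            obtain ⟨y, hy, hyv⟩ : ∃ y ∈ rest, ¬ y = v := by simpa using hall
            have hyr : y ∈ x :: r := by
              rw [hrest] at hy
              exact List.mem_reverse.mp hy
            rcases List.mem_cons.mp hyr with rfl | hmem
            · exact absurd hxv.symm hyv
            · have hyx : ¬ y = x := fun h => hyv (h.trans hxv.symm)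
              exact ⟨y, hmem, by simpa using hyx⟩
          · left
            simpa using hxv
        rw [takeWhile_snoc r x v hex]

lemma filter_mem_ne (l : List Int) :
    ∀ x ∈ l.filter (fun x => !(x == 0)), x ≠ 0 := by
  intro x hx
  have := (List.mem_filter.mp hx).2
  simpa using this

-- ===== VERDICT (by name: the statement is the Claim_ definition above) =====
theorem trailing_residual_run_spec : Claim_equal_trailing_residual_run := by
  intro signs _
  unfold Spec_trailing_residual_run trailing_residual_run trailing_residual_run_alt
  rw [loopA_filter, loopB_filter]
  have hfr : List.filter (fun x => !(x == 0)) signs.reverse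
      = (List.filter (fun x => !(x == 0)) signs).reverse := by
    simp [List.filter_reverse]
  rw [hfr, loopA_head _ (fun x hx => filter_mem_ne _ x (List.mem_reverse.mp hx)),
    loopB_tail _ (filter_mem_ne _), tail_eq_head_reverse]
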